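-- pv_equiv track=rewrite | github.com/waroad/Problem-Solving | 코테대회들/dev2.py | solution
-- ===== SOURCE A (Python) =====
-- from itertools import product
--
-- def solution(grid):
--     answer=0
--
--     def find2(a,b, tt):
--         arr[a][b]='d'
--         if a+1<len(grid) and tt==arr[a+1][b]:
--             find2(a+1,b,tt)
--         if a > 0 and tt == arr[a - 1][b]:
--             find2(a - 1, b, tt)
--         if b+1<len(grid[0]) and tt==arr[a][b+1]:
--             find2(a,b+1, tt)
--         if b>0 < len(grid[0]) and tt == arr[a][b-1]:
--             find2(a, b-1, tt)
--
--     def find():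
--         dict1=[]
--         for a in range(len(grid)):
--             for b in range(len(grid[0])):
--                 if arr[a][b]!='d' and arr[a][b] not in dict1:
--                     dict1.append(arr[a][b])
--                     tt=arr[a][b]
--                     find2(a,b,tt)
--                 elif arr[a][b]!='d' and arr[a][b] in dict1:
--                     return -1
--         return 0
--
--     arr=[]
--     qq=[]
--     abc=['a','b','c']
--     for i in range(len(grid)):
--         tmp=[]
--         for j in range(len(grid[0])):
--             tmp.append(grid[i][j])
--         arr.append(tmp)
--     for i in range(len(grid)):
--         for j in range(len(grid[0])):
--             if arr[i][j]=='?':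
--                 qq.append([i,j])
--     data = product(abc, repeat=len(qq))
--     b = [x[:] for x in arr]
--     for i in data:
--         for ind, j in enumerate(i):
--             arr[qq[ind][0]][qq[ind][1]]=j
--         if find()==0:
--             answer+=1
--         arr = [x[:] for x in b]
--     return answer
-- ===== SOURCE B (Python) =====
-- def solution(grid):
--     rows = len(grid)
--     cols = len(grid[0]) if grid else 0
--     base = [[grid[i][j] for j in range(cols)] for i in range(rows)]
--     qq = [(i, j) for i in range(rows) for j in range(cols) if base[i][j] == '?']
--
--     def flood(arr, a, b, tt):
--         # iterative DFS with an explicit stack instead of recursion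
--         stack = [(a, b)]
--         while stack:
--             x, y = stack.pop()
--             if arr[x][y] == tt:
--                 arr[x][y] = 'd'
--                 if y > 0:
--                     stack.append((x, y - 1))
--                 if y + 1 < cols:
--                     stack.append((x, y + 1))
--                 if x > 0:
--                     stack.append((x - 1, y))
--                 if x + 1 < rows:
--                     stack.append((x + 1, y))
--
--     def ok(arr):
--         seen = []
--         for a in range(rows):
--             for b in range(cols):
--                 v = arr[a][b]
--                 if v == 'd':
--                     continue
--                 if v in seen:
--                     return False
--                 seen.append(v)
--                 flood(arr, a, b, v)
--         return True
--
--     def count(k, arr):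
--         # assign the '?' cells one at a time, recursively
--         if k == len(qq):
--             return 1 if ok([row[:] for row in arr]) else 0
--         i, j = qq[k]
--         total = 0
--         for c in ('a', 'b', 'c'):
--             arr[i][j] = c
--             total += count(k + 1, arr)
--         arr[i][j] = base[i][j]
--         return total
--
--     return count(0, [row[:] for row in base])
-- ===== Notes on version B (the rewrite author's own statement) =====
-- stated objective: alternative
-- what changed: The recursive four-way flood fill becomes an iterative DFS with an explicit stack, and the itertools.product enumeration of '?' assignments becomes a backtracking recursion that assigns one '?' cell at a time; the connectivity check returns a bool instead of the -1/0 sentinel.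
import Mathlib
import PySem

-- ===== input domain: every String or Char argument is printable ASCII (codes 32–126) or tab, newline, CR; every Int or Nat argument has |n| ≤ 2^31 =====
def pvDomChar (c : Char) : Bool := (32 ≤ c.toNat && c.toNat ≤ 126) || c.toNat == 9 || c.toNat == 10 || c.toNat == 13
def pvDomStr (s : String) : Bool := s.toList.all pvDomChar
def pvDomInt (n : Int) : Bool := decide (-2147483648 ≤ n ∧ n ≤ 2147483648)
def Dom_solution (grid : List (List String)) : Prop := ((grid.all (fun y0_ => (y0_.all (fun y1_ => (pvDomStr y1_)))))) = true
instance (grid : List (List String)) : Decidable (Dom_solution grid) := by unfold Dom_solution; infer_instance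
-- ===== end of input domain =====

-- B replaces A's recursive flood fill by an explicit-stack iterative DFS and A's
-- itertools.product enumeration by a backtracking recursion over the '?' cells
-- (objective: alternative). Both Pythons mutate only local grid copies; the
-- equivalence proved here is about the return value.

-- shared cell accessors for the rectangular rows × cols grid copies
def get2 (arr : List (List String)) (a b : Nat) : String := (arr.getD a []).getD b ""
def set2 (arr : List (List String)) (a b : Nat) (v : String) : List (List String) :=
  arr.set a ((arr.getD a []).set b v)
-- scan order of the nested "for a in range(rows): for b in range(cols)" loops
def allIdx (rows cols : Nat) : List (Nat × Nat) :=
  (List.range rows).flatMap (fun a => (List.range cols).map (fun b => (a, b)))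

-- ===== PORT A =====
-- find2: recursive flood fill marking the component of value tt with "d"; fuel
-- rows*cols+1 always suffices (each call consumes one tt-cell; proved below)
def frec (rows cols : Nat) (tt : String) : Nat → List (List String) → Nat → Nat → List (List String)
  | 0, arr, _, _ => arr
  | fuel+1, arr, a, b =>
    let arr1 := set2 arr a b "d"
    let arr2 := if a+1 < rows ∧ get2 arr1 (a+1) b = tt then frec rows cols tt fuel arr1 (a+1) b else arr1
    let arr3 := if 0 < a ∧ get2 arr2 (a-1) b = tt then frec rows cols tt fuel arr2 (a-1) b else arr2
    let arr4 := if b+1 < cols ∧ get2 arr3 a (b+1) = tt then frec rows cols tt fuel arr3 a (b+1) else arr3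
    if 0 < b ∧ 0 < cols ∧ get2 arr4 a (b-1) = tt then frec rows cols tt fuel arr4 a (b-1) else arr4

-- find(): the nested scan flattened over allIdx, the dict1 list, early return -1
def findScan (rows cols : Nat) : List (Nat × Nat) → List String → List (List String) → Int
  | [], _, _ => 0
  | (a, b) :: rest, dict1, arr =>
    let v := get2 arr a b
    if v ≠ "d" ∧ v ∉ dict1 then
      findScan rows cols rest (dict1 ++ [v]) (frec rows cols v (rows*cols+1) arr a b)
    else if v ≠ "d" ∧ v ∈ dict1 then -1
    else findScan rows cols rest dict1 arr

-- itertools.product(['a','b','c'], repeat=n); first coordinate varies slowest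
def prodRep : Nat → List (List String)
  | 0 => [[]]
  | n+1 => ["a", "b", "c"].flatMap (fun c => (prodRep n).map (fun t => c :: t))

-- for ind, j in enumerate(i): arr[qq[ind][0]][qq[ind][1]] = j
def writeAll (arr : List (List String)) (qq : List (Nat × Nat)) (tup : List String) :
    List (List String) :=
  (qq.zip tup).foldl (fun a pc => set2 a pc.1.1 pc.1.2 pc.2) arr

def solution (grid : List (List String)) : Int :=
  let rows := grid.length
  let cols := (grid.headD []).length
  let arr := (List.range rows).map (fun i => (List.range cols).map (fun j => (grid.getD i []).getD j ""))
  let qq := (allIdx rows cols).filter (fun p => get2 arr p.1 p.2 = "?")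
  (prodRep qq.length).foldl
    (fun ans tup => if findScan rows cols (allIdx rows cols) [] (writeAll arr qq tup) = 0 then ans + 1 else ans) 0

-- ===== PORT B =====
-- iterative DFS: the Lean list models the Python stack with its TOP at the HEAD
-- (Python appends left,right,up,down and pops from the end, so down is popped first)
def flood (rows cols : Nat) (tt : String) : Nat → List (List String) → List (Nat × Nat) → List (List String)
  | _, arr, [] => arr
  | 0, arr, _ => arr
  | fuel+1, arr, (a, b) :: rest =>
    if get2 arr a b = tt then
      let push := (if a+1 < rows then [(a+1, b)] else []) ++ (if 0 < a then [(a-1, b)] else [])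
        ++ (if b+1 < cols then [(a, b+1)] else []) ++ (if 0 < b then [(a, b-1)] else [])
      flood rows cols tt fuel (set2 arr a b "d") (push ++ rest)
    else flood rows cols tt fuel arr rest

-- ok(): every non-"d" value appears as a single flooded region
def okScan (rows cols : Nat) : List (Nat × Nat) → List String → List (List String) → Bool
  | [], _, _ => true
  | (a, b) :: rest, seen, arr =>
    let v := get2 arr a b
    if v = "d" then okScan rows cols rest seen arr
    else if v ∈ seen then false
    else okScan rows cols rest (seen ++ [v]) (flood rows cols v (5*rows*cols+1) arr [(a, b)])

-- count(): assign the '?' cells one at a time, three colours each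
def countB (rows cols : Nat) : List (Nat × Nat) → List (List String) → Int
  | [], arr => if okScan rows cols (allIdx rows cols) [] arr then 1 else 0
  | (i, j) :: rest, arr => ["a", "b", "c"].foldl (fun t c => t + countB rows cols rest (set2 arr i j c)) 0

def solution_alt (grid : List (List String)) : Int :=
  let rows := grid.length
  let cols := (grid.headD []).length
  let base := (List.range rows).map (fun i => (List.range cols).map (fun j => (grid.getD i []).getD j ""))
  let qq := (allIdx rows cols).filter (fun p => get2 base p.1 p.2 = "?")
  countB rows cols qq base

-- ===== PRECONDITION & SPEC =====
-- Pre_ excludes exactly the inputs where Python A raises IndexError: grids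
-- having a row shorter than row 0 (arr[i][j] is read for every j < len(grid[0])).
def Pre_solution (grid : List (List String)) : Prop :=
  ∀ row ∈ grid, (grid.headD []).length ≤ row.length
instance (grid : List (List String)) : Decidable (Pre_solution grid) := by
  unfold Pre_solution; infer_instance
def pvWitness_solution : List (List String) := [["?", "a"], ["b", "?"]]

def Spec_solution (grid : List (List String)) (out : Int) : Prop := out = solution_alt grid
instance (grid : List (List String)) (out : Int) : Decidable (Spec_solution grid out) := by
  unfold Spec_solution; infer_instance

-- ===== CLAIM (what is proved, stated in full; the proofs are below) =====
def Claim_equal_solution : Prop :=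
  ∀ (grid : List (List String)), Dom_solution grid → Pre_solution grid →
    Spec_solution grid (solution grid)

-- ===== LEMMAS AND PROOFS =====

-- rectangular shape invariant of all grid copies
def Shape (rows cols : Nat) (arr : List (List String)) : Prop :=
  arr.length = rows ∧ ∀ row ∈ arr, row.length = cols
-- number of in-range cells currently holding value tt: the termination measure
def countTT (rows cols : Nat) (tt : String) (arr : List (List String)) : Nat :=
  (allIdx rows cols).countP (fun p => get2 arr p.1 p.2 = tt)
-- the whole flood fill from one popped cell, as one step of a fold over the stack
def step (rows cols : Nat) (tt : String) (arr : List (List String)) (p : Nat × Nat) :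
    List (List String) :=
  if get2 arr p.1 p.2 = tt then frec rows cols tt (rows*cols+1) arr p.1 p.2 else arr
-- neighbours in A's recursion order (= B's pop order): down, up, right, left
def nbrs (rows cols a b : Nat) : List (Nat × Nat) :=
  (if a+1 < rows then [(a+1, b)] else []) ++ (if 0 < a then [(a-1, b)] else [])
    ++ (if b+1 < cols then [(a, b+1)] else []) ++ (if 0 < b then [(a, b-1)] else [])

theorem get2_set2 (arr : List (List String)) (a b : Nat) (v : String) (x y : Nat) :
    get2 (set2 arr a b v) x y
      = if x = a ∧ y = b ∧ a < arr.length ∧ b < (arr.getD a []).length then v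
        else get2 arr x y := by
  simp only [get2, set2, List.getD, List.getElem?_set]
  split_ifs <;> simp_all [List.getElem?_set, List.getD_getElem?] <;> split_ifs <;> simp_all <;> omega

theorem mem_allIdx (rows cols a b : Nat) :
    (a, b) ∈ allIdx rows cols ↔ a < rows ∧ b < cols := by
  simp [allIdx]

theorem getD_length {rows cols : Nat} {arr : List (List String)} (h : Shape rows cols arr)
    {a : Nat} (ha : a < rows) : (arr.getD a []).length = cols := by
  obtain ⟨hl, hr⟩ := h
  rw [List.getD_eq_getElem?_getD, List.getElem?_eq_getElem (by omega)]; simp only [Option.getD_some]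
  exact hr _ (List.getElem_mem _)

theorem shape_set2 {rows cols : Nat} {arr : List (List String)} (h : Shape rows cols arr)
    (a b : Nat) (v : String) : Shape rows cols (set2 arr a b v) := by
  obtain ⟨hl, hr⟩ := h
  by_cases hal : a < arr.length
  · refine ⟨by simp [set2, hl], ?_⟩
    intro row hrow
    rcases List.mem_or_eq_of_mem_set hrow with h1 | h1
    · exact hr row h1
    · subst h1
      rw [List.length_set, List.getD_eq_getElem?_getD, List.getElem?_eq_getElem hal,
        Option.getD_some]
      exact hr _ (List.getElem_mem hal)
  · rw [show set2 arr a b v = arr from List.set_eq_of_length_le (by omega)]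
    exact ⟨hl, hr⟩

theorem countP_lt_of {α : Type} (p q : α → Bool) (l : List α)
    (hmono : ∀ x ∈ l, q x = true → p x = true) (x0 : α) (hx : x0 ∈ l)
    (hp : p x0 = true) (hq : q x0 = false) : l.countP q < l.countP p := by
  induction l with
  | nil => simp at hx
  | cons h t ih =>
    rcases List.mem_cons.mp hx with hx1 | hx1
    · subst hx1
      have hle : t.countP q ≤ t.countP p :=
        List.countP_mono_left (fun x hxt => hmono x (List.mem_cons_of_mem _ hxt))
      simp [hp, hq]; omega
    · have := ih (fun x hxt => hmono x (List.mem_cons_of_mem _ hxt)) hx1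
      by_cases hh : q h = true
      · have := hmono h (List.mem_cons_self) hh
        simp [hh, this]; omega
      · simp at hh
        simp [List.countP_cons, hh]
        split <;> omega

theorem countTT_le (rows cols : Nat) (tt : String) (arr : List (List String)) :
    countTT rows cols tt arr ≤ rows * cols := by
  have h1 := List.countP_le_length (l := allIdx rows cols) (p := fun p => decide (get2 arr p.1 p.2 = tt))
  have h2 : (allIdx rows cols).length = rows * cols := by
    simp [allIdx, List.length_flatMap, List.map_const']
  rw [countTT]; omega

theorem countTT_pos {rows cols : Nat} {tt : String} {arr : List (List String)}
    {a b : Nat} (ha : a < rows) (hb : b < cols) (hv : get2 arr a b = tt) :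
    1 ≤ countTT rows cols tt arr := by
  have : 0 < (allIdx rows cols).countP (fun p => decide (get2 arr p.1 p.2 = tt)) :=
    List.countP_pos_iff.mpr ⟨(a, b), (mem_allIdx rows cols a b).mpr ⟨ha, hb⟩, by simp [hv]⟩
  rw [countTT]; omega

theorem countTT_set_d_le {rows cols : Nat} {tt : String} (htt : tt ≠ "d")
    {arr : List (List String)} (h : Shape rows cols arr) (a b : Nat) :
    countTT rows cols tt (set2 arr a b "d") ≤ countTT rows cols tt arr := by
  apply List.countP_mono_left
  intro x hx hq
  simp only [decide_eq_true_eq] at hq ⊢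
  rw [get2_set2] at hq
  split at hq
  · exact absurd hq.symm htt
  · exact hq

theorem countTT_set_d_lt {rows cols : Nat} {tt : String} (htt : tt ≠ "d")
    {arr : List (List String)} (h : Shape rows cols arr) {a b : Nat}
    (ha : a < rows) (hb : b < cols) (hv : get2 arr a b = tt) :
    countTT rows cols tt (set2 arr a b "d") < countTT rows cols tt arr := by
  apply countP_lt_of _ _ _ _ (a, b) ((mem_allIdx rows cols a b).mpr ⟨ha, hb⟩)
  · simp [hv]
  · have hbnd : a < arr.length ∧ b < (arr.getD a []).length := by
      have hL : arr.length = rows := h.1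
      refine ⟨by omega, ?_⟩
      rw [getD_length h (by omega)]; omega
    have hb2 : b < arr[a].length := by
      have h2 := hbnd.2
      rwa [List.getD_eq_getElem?_getD, List.getElem?_eq_getElem hbnd.1, Option.getD_some] at h2
    simp [get2_set2, hbnd.1, hb2]
    exact Ne.symm htt
  · intro x hx hq
    simp only [decide_eq_true_eq] at hq ⊢
    rw [get2_set2] at hq
    split at hq
    · exact absurd hq.symm htt
    · exact hq

theorem shape_frec {rows cols : Nat} {tt : String} :
    ∀ (fuel : Nat) (arr : List (List String)) (a b : Nat), Shape rows cols arr →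
      Shape rows cols (frec rows cols tt fuel arr a b) := by
  intro fuel
  induction fuel with
  | zero => intro arr a b h; simpa [frec] using h
  | succ g ih =>
    intro arr a b h
    simp only [frec]
    have h1 : Shape rows cols (set2 arr a b "d") := shape_set2 h a b "d"
    set A1 := set2 arr a b "d" with hA1
    set A2 := if a+1 < rows ∧ get2 A1 (a+1) b = tt then frec rows cols tt g A1 (a+1) b else A1 with hA2
    have h2 : Shape rows cols A2 := by rw [hA2]; split; exacts [ih _ _ _ h1, h1]
    set A3 := if 0 < a ∧ get2 A2 (a-1) b = tt then frec rows cols tt g A2 (a-1) b else A2 with hA3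
    have h3 : Shape rows cols A3 := by rw [hA3]; split; exacts [ih _ _ _ h2, h2]
    set A4 := if b+1 < cols ∧ get2 A3 a (b+1) = tt then frec rows cols tt g A3 a (b+1) else A3 with hA4
    have h4 : Shape rows cols A4 := by rw [hA4]; split; exacts [ih _ _ _ h3, h3]
    split
    exacts [ih _ _ _ h4, h4]

theorem frec_count_le {rows cols : Nat} {tt : String} (htt : tt ≠ "d") :
    ∀ (fuel : Nat) (arr : List (List String)) (a b : Nat), Shape rows cols arr →
      countTT rows cols tt (frec rows cols tt fuel arr a b) ≤ countTT rows cols tt arr := by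
  intro fuel
  induction fuel with
  | zero => intro arr a b h; simp [frec]
  | succ g ih =>
    intro arr a b h
    simp only [frec]
    have h1 : Shape rows cols (set2 arr a b "d") := shape_set2 h a b "d"
    have hc1 := countTT_set_d_le htt h a b
    set A1 := set2 arr a b "d" with hA1
    set A2 := if a+1 < rows ∧ get2 A1 (a+1) b = tt then frec rows cols tt g A1 (a+1) b else A1 with hA2
    have h2 : Shape rows cols A2 := by rw [hA2]; split; exacts [shape_frec _ _ _ _ h1, h1]
    have hc2 : countTT rows cols tt A2 ≤ countTT rows cols tt A1 := by
      rw [hA2]; split; exacts [ih _ _ _ h1, le_refl _]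
    set A3 := if 0 < a ∧ get2 A2 (a-1) b = tt then frec rows cols tt g A2 (a-1) b else A2 with hA3
    have h3 : Shape rows cols A3 := by rw [hA3]; split; exacts [shape_frec _ _ _ _ h2, h2]
    have hc3 : countTT rows cols tt A3 ≤ countTT rows cols tt A2 := by
      rw [hA3]; split; exacts [ih _ _ _ h2, le_refl _]
    set A4 := if b+1 < cols ∧ get2 A3 a (b+1) = tt then frec rows cols tt g A3 a (b+1) else A3 with hA4
    have h4 : Shape rows cols A4 := by rw [hA4]; split; exacts [shape_frec _ _ _ _ h3, h3]
    have hc4 : countTT rows cols tt A4 ≤ countTT rows cols tt A3 := by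
      rw [hA4]; split; exacts [ih _ _ _ h3, le_refl _]
    have hc5 : countTT rows cols tt (if 0 < b ∧ 0 < cols ∧ get2 A4 a (b-1) = tt then frec rows cols tt g A4 a (b-1) else A4) ≤ countTT rows cols tt A4 := by
      split; exacts [ih _ _ _ h4, le_refl _]
    omega

theorem frec_fuel_succ {rows cols : Nat} {tt : String} (htt : tt ≠ "d") :
    ∀ (fuel : Nat) (arr : List (List String)) (a b : Nat), Shape rows cols arr →
      a < rows → b < cols → get2 arr a b = tt → countTT rows cols tt arr ≤ fuel →
      frec rows cols tt (fuel+1) arr a b = frec rows cols tt fuel arr a b := by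
  intro fuel
  induction fuel with
  | zero =>
    intro arr a b h ha hb hv hc
    have := countTT_pos ha hb hv
    omega
  | succ g ih =>
    intro arr a b h ha hb hv hc
    have h1 : Shape rows cols (set2 arr a b "d") := shape_set2 h a b "d"
    have hlt := countTT_set_d_lt htt h ha hb hv
    conv_lhs => rw [frec]
    conv_rhs => rw [frec]

    set A1 := set2 arr a b "d" with hA1
    have e2 : (if a+1 < rows ∧ get2 A1 (a+1) b = tt then frec rows cols tt (g+1) A1 (a+1) b else A1)
        = (if a+1 < rows ∧ get2 A1 (a+1) b = tt then frec rows cols tt g A1 (a+1) b else A1) := by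
      split
      next hcnd => exact ih _ _ _ h1 hcnd.1 hb hcnd.2 (by omega)
      next => rfl
    rw [e2]
    set A2 := if a+1 < rows ∧ get2 A1 (a+1) b = tt then frec rows cols tt g A1 (a+1) b else A1 with hA2
    have h2 : Shape rows cols A2 := by rw [hA2]; split; exacts [shape_frec _ _ _ _ h1, h1]
    have hc2 : countTT rows cols tt A2 ≤ g := by
      have : countTT rows cols tt A2 ≤ countTT rows cols tt A1 := by
        rw [hA2]; split; exacts [frec_count_le htt _ _ _ _ h1, le_refl _]
      omega
    have e3 : (if 0 < a ∧ get2 A2 (a-1) b = tt then frec rows cols tt (g+1) A2 (a-1) b else A2)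
        = (if 0 < a ∧ get2 A2 (a-1) b = tt then frec rows cols tt g A2 (a-1) b else A2) := by
      split
      next hcnd => exact ih _ _ _ h2 (by omega) hb hcnd.2 hc2
      next => rfl
    rw [e3]
    set A3 := if 0 < a ∧ get2 A2 (a-1) b = tt then frec rows cols tt g A2 (a-1) b else A2 with hA3
    have h3 : Shape rows cols A3 := by rw [hA3]; split; exacts [shape_frec _ _ _ _ h2, h2]
    have hc3 : countTT rows cols tt A3 ≤ g := by
      have : countTT rows cols tt A3 ≤ countTT rows cols tt A2 := by
        rw [hA3]; split; exacts [frec_count_le htt _ _ _ _ h2, le_refl _]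
      omega
    have e4 : (if b+1 < cols ∧ get2 A3 a (b+1) = tt then frec rows cols tt (g+1) A3 a (b+1) else A3)
        = (if b+1 < cols ∧ get2 A3 a (b+1) = tt then frec rows cols tt g A3 a (b+1) else A3) := by
      split
      next hcnd => exact ih _ _ _ h3 ha hcnd.1 hcnd.2 hc3
      next => rfl
    rw [e4]
    set A4 := if b+1 < cols ∧ get2 A3 a (b+1) = tt then frec rows cols tt g A3 a (b+1) else A3 with hA4
    have h4 : Shape rows cols A4 := by rw [hA4]; split; exacts [shape_frec _ _ _ _ h3, h3]
    have hc4 : countTT rows cols tt A4 ≤ g := by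
      have : countTT rows cols tt A4 ≤ countTT rows cols tt A3 := by
        rw [hA4]; split; exacts [frec_count_le htt _ _ _ _ h3, le_refl _]
      omega
    split
    next hcnd => exact ih _ _ _ h4 ha (by omega) hcnd.2.2 hc4
    next => rfl

theorem frec_fuel_ge {rows cols : Nat} {tt : String} (htt : tt ≠ "d")
    {arr : List (List String)} {a b : Nat} (h : Shape rows cols arr)
    (ha : a < rows) (hb : b < cols) (hv : get2 arr a b = tt) {f1 f2 : Nat}
    (hc : countTT rows cols tt arr ≤ f1) (hle : f1 ≤ f2) :
    frec rows cols tt f2 arr a b = frec rows cols tt f1 arr a b := by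
  induction f2, hle using Nat.le_induction with
  | base => rfl
  | succ n hn ihn =>
    rw [frec_fuel_succ htt n arr a b h ha hb hv (by omega)]
    exact ihn

theorem mem_nbrs {rows cols a b : Nat} (ha : a < rows) (hb : b < cols) :
    ∀ q ∈ nbrs rows cols a b, q.1 < rows ∧ q.2 < cols := by
  intro q hq
  unfold nbrs at hq
  simp only [List.mem_append] at hq
  rcases hq with ((h1 | h1) | h1) | h1 <;> split_ifs at h1 <;> (try simp_all) <;> omega

theorem len_nbrs (rows cols a b : Nat) : (nbrs rows cols a b).length ≤ 4 := by
  unfold nbrs; split_ifs <;> simp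

theorem frec_eq_fold {rows cols : Nat} {tt : String} (htt : tt ≠ "d")
    {arr : List (List String)} {a b : Nat} (h : Shape rows cols arr)
    (ha : a < rows) (hb : b < cols) (hv : get2 arr a b = tt) {fuel : Nat}
    (hc : countTT rows cols tt arr ≤ fuel) :
    frec rows cols tt (fuel+1) arr a b
      = (nbrs rows cols a b).foldl (step rows cols tt) (set2 arr a b "d") := by
  have h1 : Shape rows cols (set2 arr a b "d") := shape_set2 h a b "d"
  have hlt := countTT_set_d_lt htt h ha hb hv
  conv_lhs => rw [frec]
  rw [nbrs, List.foldl_append, List.foldl_append, List.foldl_append]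
  set A1 := set2 arr a b "d" with hA1
  have e1 : List.foldl (step rows cols tt) A1 (if a+1 < rows then [(a+1, b)] else [])
      = (if a+1 < rows ∧ get2 A1 (a+1) b = tt then frec rows cols tt fuel A1 (a+1) b else A1) := by
    by_cases hr1 : a+1 < rows
    · simp only [hr1, if_true, List.foldl_cons, List.foldl_nil, step]
      by_cases hg : get2 A1 (a+1) b = tt
      · rw [if_pos hg, if_pos (by tauto),
          frec_fuel_ge (f2 := rows*cols+1) htt h1 hr1 hb hg (le_refl _) (by have := countTT_le rows cols tt A1; omega),
          frec_fuel_ge (f2 := fuel) htt h1 hr1 hb hg (le_refl _) (by omega)]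
      · rw [if_neg hg, if_neg (by tauto)]
    · simp [hr1]
  rw [e1]
  set A2 := if a+1 < rows ∧ get2 A1 (a+1) b = tt then frec rows cols tt fuel A1 (a+1) b else A1 with hA2
  have h2 : Shape rows cols A2 := by rw [hA2]; split; exacts [shape_frec _ _ _ _ h1, h1]
  have hc2 : countTT rows cols tt A2 ≤ countTT rows cols tt A1 := by
    rw [hA2]; split; exacts [frec_count_le htt _ _ _ _ h1, le_refl _]
  have e2 : List.foldl (step rows cols tt) A2 (if 0 < a then [(a-1, b)] else [])
      = (if 0 < a ∧ get2 A2 (a-1) b = tt then frec rows cols tt fuel A2 (a-1) b else A2) := by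
    by_cases hr1 : 0 < a
    · simp only [hr1, if_true, List.foldl_cons, List.foldl_nil, step]
      by_cases hg : get2 A2 (a-1) b = tt
      · rw [if_pos hg, if_pos (by tauto),
          frec_fuel_ge (f2 := rows*cols+1) htt h2 (by omega) hb hg (le_refl _) (by have := countTT_le rows cols tt A2; omega),
          frec_fuel_ge (f2 := fuel) htt h2 (by omega) hb hg (le_refl _) (by omega)]
      · rw [if_neg hg, if_neg (by tauto)]
    · simp [hr1]
  rw [e2]
  set A3 := if 0 < a ∧ get2 A2 (a-1) b = tt then frec rows cols tt fuel A2 (a-1) b else A2 with hA3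
  have h3 : Shape rows cols A3 := by rw [hA3]; split; exacts [shape_frec _ _ _ _ h2, h2]
  have hc3 : countTT rows cols tt A3 ≤ countTT rows cols tt A2 := by
    rw [hA3]; split; exacts [frec_count_le htt _ _ _ _ h2, le_refl _]
  have e3 : List.foldl (step rows cols tt) A3 (if b+1 < cols then [(a, b+1)] else [])
      = (if b+1 < cols ∧ get2 A3 a (b+1) = tt then frec rows cols tt fuel A3 a (b+1) else A3) := by
    by_cases hr1 : b+1 < cols
    · simp only [hr1, if_true, List.foldl_cons, List.foldl_nil, step]
      by_cases hg : get2 A3 a (b+1) = tt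
      · rw [if_pos hg, if_pos (by tauto),
          frec_fuel_ge (f2 := rows*cols+1) htt h3 ha hr1 hg (le_refl _) (by have := countTT_le rows cols tt A3; omega),
          frec_fuel_ge (f2 := fuel) htt h3 ha hr1 hg (le_refl _) (by omega)]
      · rw [if_neg hg, if_neg (by tauto)]
    · simp [hr1]
  rw [e3]
  set A4 := if b+1 < cols ∧ get2 A3 a (b+1) = tt then frec rows cols tt fuel A3 a (b+1) else A3 with hA4
  have h4 : Shape rows cols A4 := by rw [hA4]; split; exacts [shape_frec _ _ _ _ h3, h3]
  have hc4 : countTT rows cols tt A4 ≤ countTT rows cols tt A3 := by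
    rw [hA4]; split; exacts [frec_count_le htt _ _ _ _ h3, le_refl _]
  by_cases hr1 : 0 < b
  · have hcolpos : 0 < cols := by omega
    simp only [hr1, if_true, List.foldl_cons, List.foldl_nil, step]
    by_cases hg : get2 A4 a (b-1) = tt
    · rw [if_pos hg, if_pos (by tauto),
        frec_fuel_ge (f2 := rows*cols+1) htt h4 ha (by omega) hg (le_refl _) (by have := countTT_le rows cols tt A4; omega),
        frec_fuel_ge (f2 := fuel) htt h4 ha (by omega) hg (le_refl _) (by omega)]
    · rw [if_neg hg, if_neg (by tauto)]
  · simp [hr1]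

theorem stack_eq_foldl {rows cols : Nat} {tt : String} (htt : tt ≠ "d") :
    ∀ (fuel : Nat) (arr : List (List String)) (stack : List (Nat × Nat)),
      Shape rows cols arr → (∀ p ∈ stack, p.1 < rows ∧ p.2 < cols) →
      5 * countTT rows cols tt arr + stack.length ≤ fuel →
      flood rows cols tt fuel arr stack = stack.foldl (step rows cols tt) arr := by
  intro fuel
  induction fuel with
  | zero =>
    intro arr stack h hstk hc
    cases stack with
    | nil => simp [flood]
    | cons p rest => simp at hc
  | succ g ih =>
    intro arr stack h hstk hc
    cases stack with
    | nil => simp [flood]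
    | cons p rest =>
      obtain ⟨a, b⟩ := p
      have ha1 : a < rows := (hstk (a, b) List.mem_cons_self).1
      have hb1 : b < cols := (hstk (a, b) List.mem_cons_self).2
      simp only [flood]
      by_cases hv : get2 arr a b = tt
      · rw [if_pos hv]
        have hlt := countTT_set_d_lt htt h ha1 hb1 hv
        have hpos := countTT_pos ha1 hb1 hv
        have h1 : Shape rows cols (set2 arr a b "d") := shape_set2 h a b "d"
        have hpush : ((if a+1 < rows then [(a+1, b)] else []) ++ (if 0 < a then [(a-1, b)] else [])
            ++ (if b+1 < cols then [(a, b+1)] else []) ++ (if 0 < b then [(a, b-1)] else []))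
            = nbrs rows cols a b := rfl
        rw [hpush]
        have hn := len_nbrs rows cols a b
        rw [ih (set2 arr a b "d") (nbrs rows cols a b ++ rest) h1 ?mem ?fuel]
        case mem =>
          intro q hq
          rcases List.mem_append.mp hq with hq | hq
          · exact mem_nbrs ha1 hb1 q hq
          · exact hstk q (List.mem_cons_of_mem _ hq)
        case fuel =>
          rw [List.length_append]
          simp only [List.length_cons] at hc
          omega
        rw [List.foldl_append, List.foldl_cons]
        congr 1
        have hstep : step rows cols tt arr (a, b) = frec rows cols tt (rows*cols+1) arr a b := by
          rw [step]; exact if_pos hv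
        rw [hstep, frec_eq_fold htt h ha1 hb1 hv (by have := countTT_le rows cols tt arr; omega)]
      · rw [if_neg hv]
        rw [ih arr rest h (fun q hq => hstk q (List.mem_cons_of_mem _ hq))
          (by simp only [List.length_cons] at hc; omega)]
        rw [List.foldl_cons]
        have : step rows cols tt arr (a, b) = arr := by rw [step]; exact if_neg hv
        rw [this]

theorem flood_eq_frec {rows cols : Nat} {tt : String} (htt : tt ≠ "d")
    {arr : List (List String)} {a b : Nat} (h : Shape rows cols arr)
    (ha : a < rows) (hb : b < cols) (hv : get2 arr a b = tt) :
    flood rows cols tt (5*rows*cols+1) arr [(a, b)]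
      = frec rows cols tt (rows*cols+1) arr a b := by
  rw [stack_eq_foldl htt _ _ _ h
    (by intro q hq; simp at hq; subst hq; exact ⟨ha, hb⟩)
    (by have := countTT_le rows cols tt arr
        have h5 : 5*rows*cols = 5*(rows*cols) := by ring
        simp; omega)]
  simp only [List.foldl_cons, List.foldl_nil]
  rw [step]
  exact if_pos hv

theorem findScan_eq_okScan {rows cols : Nat} :
    ∀ (idx : List (Nat × Nat)) (seen : List String) (arr : List (List String)),
      Shape rows cols arr → (∀ p ∈ idx, p.1 < rows ∧ p.2 < cols) →
      findScan rows cols idx seen arr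
        = (if okScan rows cols idx seen arr then 0 else -1) := by
  intro idx
  induction idx with
  | nil => intro seen arr h hidx; simp [findScan, okScan]
  | cons p rest ih =>
    obtain ⟨a, b⟩ := p
    intro seen arr h hidx
    have ha : a < rows := (hidx (a, b) List.mem_cons_self).1
    have hb : b < cols := (hidx (a, b) List.mem_cons_self).2
    have hrest : ∀ q ∈ rest, q.1 < rows ∧ q.2 < cols :=
      fun q hq => hidx q (List.mem_cons_of_mem _ hq)
    simp only [findScan]
    by_cases hd : get2 arr a b = "d"
    · have hok : okScan rows cols ((a, b) :: rest) seen arr = okScan rows cols rest seen arr := by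
        simp only [okScan]; rw [if_pos hd]
      rw [if_neg (by tauto), if_neg (by tauto), hok]
      exact ih seen arr h hrest
    · by_cases hm : get2 arr a b ∈ seen
      · have hok : okScan rows cols ((a, b) :: rest) seen arr = false := by
          simp only [okScan]; rw [if_neg hd, if_pos hm]
        rw [if_neg (by tauto), if_pos ⟨hd, hm⟩, hok]
        simp
      · have hok : okScan rows cols ((a, b) :: rest) seen arr
            = okScan rows cols rest (seen ++ [get2 arr a b])
                (flood rows cols (get2 arr a b) (5*rows*cols+1) arr [(a, b)]) := by
          simp only [okScan]; rw [if_neg hd, if_neg hm]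
        rw [if_pos ⟨hd, hm⟩, hok, flood_eq_frec hd h ha hb rfl]
        exact ih (seen ++ [get2 arr a b]) _ (shape_frec _ _ _ _ h) hrest

theorem shape_writeAll {rows cols : Nat} {arr : List (List String)} (h : Shape rows cols arr)
    (qq : List (Nat × Nat)) (tup : List String) : Shape rows cols (writeAll arr qq tup) := by
  rw [writeAll]
  generalize qq.zip tup = l
  induction l generalizing arr with
  | nil => simpa using h
  | cons x t ih => exact ih (shape_set2 h _ _ _)

theorem writeAll_cons (arr : List (List String)) (i j : Nat) (rest : List (Nat × Nat))
    (c : String) (tup : List String) :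
    writeAll arr ((i, j) :: rest) (c :: tup) = writeAll (set2 arr i j c) rest tup := rfl

theorem countB_eq_sum {rows cols : Nat} :
    ∀ (qq : List (Nat × Nat)) (arr : List (List String)),
      countB rows cols qq arr
        = ((prodRep qq.length).map
            (fun tup => if okScan rows cols (allIdx rows cols) [] (writeAll arr qq tup)
              then (1 : Int) else 0)).sum := by
  intro qq
  induction qq with
  | nil => intro arr; simp [countB, prodRep, writeAll]
  | cons p rest ih =>
    obtain ⟨i, j⟩ := p
    intro arr
    simp only [countB, List.foldl_cons, List.foldl_nil, List.length_cons, prodRep,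
      List.flatMap_cons, List.flatMap_nil, List.map_append, List.sum_append,
      List.map_map, List.append_nil, Function.comp_def, writeAll_cons]
    rw [ih (set2 arr i j "a"), ih (set2 arr i j "b"), ih (set2 arr i j "c")]
    simp only [zero_add]
    rw [add_assoc]
    rfl

theorem foldl_if_count {α : Type} (P : α → Prop) [DecidablePred P] :
    ∀ (l : List α) (n : Int),
      l.foldl (fun ans t => if P t then ans + 1 else ans) n
        = n + (l.map (fun t => if P t then (1 : Int) else 0)).sum := by
  intro l
  induction l with
  | nil => intro n; simp
  | cons x t ih =>
    intro n
    simp only [List.foldl_cons, List.map_cons, List.sum_cons]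
    by_cases hp : P x
    · rw [if_pos hp, if_pos hp, ih]; omega
    · rw [if_neg hp, if_neg hp, ih]; omega

theorem shape_mkArr (rows cols : Nat) (grid : List (List String)) :
    Shape rows cols
      ((List.range rows).map (fun i => (List.range cols).map (fun j => (grid.getD i []).getD j ""))) := by
  constructor
  · simp
  · intro row hrow
    simp only [List.mem_map, List.mem_range] at hrow
    obtain ⟨i, _, rfl⟩ := hrow
    simp

theorem main_eq (rows cols : Nat) (arr : List (List String)) (h : Shape rows cols arr)
    (qq : List (Nat × Nat)) :
    (prodRep qq.length).foldl
      (fun ans tup => if findScan rows cols (allIdx rows cols) [] (writeAll arr qq tup) = 0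
        then ans + 1 else ans) 0
      = countB rows cols qq arr := by
  rw [foldl_if_count (P := fun tup => findScan rows cols (allIdx rows cols) [] (writeAll arr qq tup) = 0),
    countB_eq_sum, zero_add]
  apply congrArg
  apply List.map_congr_left
  intro tup _
  rw [findScan_eq_okScan (allIdx rows cols) [] _ (shape_writeAll h qq tup)
    (fun p hp => by obtain ⟨a, b⟩ := p; exact (mem_allIdx rows cols a b).mp hp)]
  cases hok : okScan rows cols (allIdx rows cols) [] (writeAll arr qq tup) <;> simp

-- ===== VERDICT (by name: the statement is the Claim_ definition above) =====
theorem solution_spec : Claim_equal_solution := by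
  intro grid _ _
  show solution grid = solution_alt grid
  unfold solution solution_alt
  exact main_eq grid.length (grid.headD []).length _ (shape_mkArr _ _ _) _
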